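-- pv_equiv track=rewrite | github.com/SohaibAamir28/AdventOfCode2024 | 2024/05/program.py | count_valid_updates
-- ===== SOURCE A (Python) =====
-- def is_valid_order(order, rules):
--     # Check if the given order satisfies all the rules
--     for x, y in rules:
--         if x in order and y in order:
--             if order.index(x) > order.index(y):
--                 return False
--     return True
--
-- def count_valid_updates(rules, updates):
--     valid_updates = []
--     invalid_updates = []
--     for update in updates:
--         if is_valid_order(update, rules):
--             valid_updates.append(update)
--         else:
--             invalid_updates.append(update)
--     return valid_updates, invalid_updates
-- ===== SOURCE B (Python) =====
-- def count_valid_updates(rules, updates):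
--     rule_set = set(rules)
--     valid_updates = []
--     invalid_updates = []
--     for update in updates:
--         pos = {}
--         for i, v in enumerate(update):
--             pos.setdefault(v, i)
--         items = list(pos.items())
--         bad = any(pa > pb and (a, b) in rule_set
--                   for a, pa in items for b, pb in items)
--         if bad:
--             invalid_updates.append(update)
--         else:
--             valid_updates.append(update)
--     return valid_updates, invalid_updates
-- ===== Notes on version B (the rewrite author's own statement) =====
-- stated objective: alternative
-- what changed: Instead of scanning the rule list per update with repeated membership tests and list.index calls, B builds a first-occurrence position dict per update and a rule set once, and detects a violation by iterating over ordered pairs of the update's distinct elements with a set lookup; it trades A's per-rule list scans for a quadratic pass over distinct elements.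
import Mathlib
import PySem

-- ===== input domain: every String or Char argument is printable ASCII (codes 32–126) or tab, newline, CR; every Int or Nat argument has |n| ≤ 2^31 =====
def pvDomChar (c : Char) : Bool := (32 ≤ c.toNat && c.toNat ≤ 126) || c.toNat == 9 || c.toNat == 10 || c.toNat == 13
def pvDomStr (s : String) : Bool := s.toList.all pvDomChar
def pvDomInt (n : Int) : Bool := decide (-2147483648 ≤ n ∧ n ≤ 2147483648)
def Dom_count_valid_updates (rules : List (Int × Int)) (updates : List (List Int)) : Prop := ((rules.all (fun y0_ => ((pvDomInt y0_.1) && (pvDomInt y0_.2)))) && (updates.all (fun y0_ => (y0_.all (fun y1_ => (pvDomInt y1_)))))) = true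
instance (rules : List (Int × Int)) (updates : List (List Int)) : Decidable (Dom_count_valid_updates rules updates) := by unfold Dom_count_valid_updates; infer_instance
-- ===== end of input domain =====

-- B builds a first-occurrence position dict per update and a rule set once, replacing A's per-rule list scans and .index calls.

-- ===== PORT A =====
-- literal port of is_valid_order: loop over rules, membership tests, list.index comparison
-- (the .getD 0 is only reached under the membership guard, where index? is some — exact)
def is_valid_order (order : List Int) (rules : List (Int × Int)) : Bool :=
  match rules with
  | [] => true
  | (x, y) :: rest =>
    if order.contains x && order.contains y then
      if ((PySem.List.index? order x).getD 0) > ((PySem.List.index? order y).getD 0) then false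
      else is_valid_order order rest
    else is_valid_order order rest

def count_valid_updates (rules : List (Int × Int)) (updates : List (List Int)) : List (List Int) × List (List Int) :=
  updates.foldl
    (fun acc update =>
      if is_valid_order update rules then (acc.1 ++ [update], acc.2)
      else (acc.1, acc.2 ++ [update]))
    ([], [])

-- ===== PORT B =====
-- pos = {}; for i, v in enumerate(update): pos.setdefault(v, i)
def buildPos (update : List Int) : PySem.Dict Int Int :=
  (PySem.List.enumerate update 0).foldl (fun d p => d.setdefault p.2 p.1) PySem.Dict.empty

def count_valid_updates_alt (rules : List (Int × Int)) (updates : List (List Int)) : List (List Int) × List (List Int) :=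
  let ruleSet : PySem.Set (Int × Int) := PySem.Set.ofList rules
  updates.foldl
    (fun acc update =>
      let items := (buildPos update).items
      let bad := items.any (fun a => items.any (fun b =>
        decide (a.2 > b.2) && ruleSet.contains (a.1, b.1)))
      if bad then (acc.1, acc.2 ++ [update])
      else (acc.1 ++ [update], acc.2))
    ([], [])

-- ===== PRECONDITION & SPEC =====
def Spec_count_valid_updates (rules : List (Int × Int)) (updates : List (List Int)) (out : List (List Int) × List (List Int)) : Prop := out = count_valid_updates_alt rules updates
instance (rules : List (Int × Int)) (updates : List (List Int)) (out : List (List Int) × List (List Int)) : Decidable (Spec_count_valid_updates rules updates out) := by unfold Spec_count_valid_updates; infer_instance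

-- ===== CLAIM (what is proved, stated in full; the proofs are below) =====
def Claim_equal_count_valid_updates : Prop := ∀ (rules : List (Int × Int)) (updates : List (List Int)), Dom_count_valid_updates rules updates → Spec_count_valid_updates rules updates (count_valid_updates rules updates)

-- ===== LEMMAS AND PROOFS =====

-- the position dict looks up the first occurrence index (shifted by the enumerate start)
theorem get?_foldl_setdefault (xs : List Int) (s : Int) (d : PySem.Dict Int Int) (k : Int) :
    ((PySem.List.enumerate xs s).foldl (fun d p => d.setdefault p.2 p.1) d).get? k
      = ((d.get? k).or ((PySem.List.index? xs k).map (fun i => s + (i : Int)))) := by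
  induction xs generalizing s d with
  | nil =>
    simp [PySem.List.enumerate, PySem.List.index?_eq_idxOf?]
  | cons x xs ih =>
    rw [PySem.List.enumerate_cons]
    simp only [List.foldl_cons]
    rw [ih]
    by_cases hk : x = k
    · subst hk
      rw [PySem.Dict.get?_setdefault_self d x s, PySem.List.index?_cons_self x xs]
      cases hdk : d.get? x <;> simp [Option.or]
    · rw [PySem.Dict.get?_setdefault_of_ne d s (Ne.symm hk), PySem.List.index?_cons_of_ne xs hk]
      cases hdk : d.get? k
      · cases hix : PySem.List.index? xs k <;> simp [Option.or] <;> push_cast <;> ring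
      · simp [Option.or]

theorem get?_buildPos (xs : List Int) (k : Int) :
    (buildPos xs).get? k = (PySem.List.index? xs k).map (fun i => (i : Int)) := by
  unfold buildPos
  rw [get?_foldl_setdefault]
  cases PySem.List.index? xs k <;> simp [Option.or, PySem.Dict.get?_empty]

theorem nodup_keys_foldl_setdefault (l : List (Int × Int)) (d : PySem.Dict Int Int)
    (h : d.keys.Nodup) : (l.foldl (fun d p => d.setdefault p.2 p.1) d).keys.Nodup := by
  induction l generalizing d with
  | nil => exact h
  | cons p l ih =>
    apply ih
    rw [PySem.Dict.keys_setdefault]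
    split_ifs with hc
    · exact h
    · refine List.Nodup.append h (List.nodup_singleton _) ?_
      intro a ha hb
      rw [List.mem_singleton] at hb
      subst hb
      rw [PySem.Dict.contains_eq_decide_mem_keys] at hc
      simp at hc
      exact hc ha

theorem nodup_keys_buildPos (xs : List Int) : (buildPos xs).keys.Nodup := by
  unfold buildPos
  exact nodup_keys_foldl_setdefault _ _ (by simp [PySem.Dict.keys_empty])

theorem mem_items_buildPos (xs : List Int) (a pa : Int) :
    (a, pa) ∈ (buildPos xs).items ↔ ∃ i : Nat, PySem.List.index? xs a = some i ∧ pa = (i : Int) := by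
  rw [← PySem.Dict.get?_eq_some_iff_mem_items _ _ _ (nodup_keys_buildPos xs), get?_buildPos]
  cases h : PySem.List.index? xs a <;> simp [eq_comm]

-- A's check as a statement over the rules
theorem valid_iff (order : List Int) (rules : List (Int × Int)) :
    is_valid_order order rules = true ↔
      ∀ x y : Int, (x, y) ∈ rules → x ∈ order → y ∈ order →
        (PySem.List.index? order x).getD 0 ≤ (PySem.List.index? order y).getD 0 := by
  induction rules with
  | nil => simp [is_valid_order]
  | cons p rest ih =>
    obtain ⟨x, y⟩ := p
    show (if order.contains x && order.contains y then
            if (PySem.List.index? order x).getD 0 > (PySem.List.index? order y).getD 0 then false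
            else is_valid_order order rest
          else is_valid_order order rest) = true ↔ _
    split_ifs with h1 h2
    · simp only [false_iff, not_forall]
      simp only [Bool.and_eq_true, List.contains_eq_mem, decide_eq_true_eq] at h1
      exact ⟨x, y, List.mem_cons_self, h1.1, h1.2, by omega⟩
    · rw [ih]
      constructor
      · intro h a b hab ha hb
        rcases List.mem_cons.mp hab with heq | hmem
        · obtain ⟨rfl, rfl⟩ := Prod.mk.injEq .. ▸ heq
          omega
        · exact h a b hmem ha hb
      · intro h a b hab ha hb
        exact h a b (List.mem_cons_of_mem _ hab) ha hb
    · rw [ih]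
      constructor
      · intro h a b hab ha hb
        rcases List.mem_cons.mp hab with heq | hmem
        · obtain ⟨rfl, rfl⟩ := Prod.mk.injEq .. ▸ heq
          exact absurd (by simp [List.contains_eq_mem, ha, hb]) h1
        · exact h a b hmem ha hb
      · intro h a b hab ha hb
        exact h a b (List.mem_cons_of_mem _ hab) ha hb

-- B's pair scan as a statement over the rules
theorem bad_iff (order : List Int) (rules : List (Int × Int)) :
    ((buildPos order).items.any (fun a => (buildPos order).items.any (fun b =>
        decide (a.2 > b.2) && (PySem.Set.ofList rules).contains (a.1, b.1)))) = true ↔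
      ∃ x y : Int, ∃ ix iy : Nat, PySem.List.index? order x = some ix ∧
        PySem.List.index? order y = some iy ∧ iy < ix ∧ (x, y) ∈ rules := by
  simp only [List.any_eq_true, Prod.exists]
  constructor
  · rintro ⟨a, pa, ha, b, pb, hb, hcond⟩
    simp only [Bool.and_eq_true, decide_eq_true_eq] at hcond
    obtain ⟨ia, hia, rfl⟩ := (mem_items_buildPos order a pa).mp ha
    obtain ⟨ib, hib, rfl⟩ := (mem_items_buildPos order b pb).mp hb
    refine ⟨a, b, ia, ib, hia, hib, by exact_mod_cast hcond.1, ?_⟩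
    have := (PySem.Set.contains_iff (PySem.Set.ofList rules) (a, b)).mp hcond.2
    exact (PySem.Set.mem_ofList _ _).mp this
  · rintro ⟨x, y, ix, iy, hix, hiy, hlt, hmem⟩
    refine ⟨x, (ix : Int), (mem_items_buildPos order x _).mpr ⟨ix, hix, rfl⟩,
            y, (iy : Int), (mem_items_buildPos order y _).mpr ⟨iy, hiy, rfl⟩, ?_⟩
    simp only [Bool.and_eq_true, decide_eq_true_eq]
    refine ⟨by exact_mod_cast hlt, ?_⟩
    exact (PySem.Set.contains_iff _ _).mpr ((PySem.Set.mem_ofList _ _).mpr hmem)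

-- A's validity check agrees with B's pair scan
theorem valid_eq_not_bad (order : List Int) (rules : List (Int × Int)) :
    is_valid_order order rules
      = !((buildPos order).items.any (fun a => (buildPos order).items.any (fun b =>
          decide (a.2 > b.2) && (PySem.Set.ofList rules).contains (a.1, b.1)))) := by
  cases h : ((buildPos order).items.any (fun a => (buildPos order).items.any (fun b =>
      decide (a.2 > b.2) && (PySem.Set.ofList rules).contains (a.1, b.1))))
  · rw [Bool.not_false, valid_iff]
    intro x y hxy hx hy
    by_contra hgt
    apply absurd h
    rw [Bool.not_eq_false, bad_iff]
    obtain ⟨ix, hix⟩ := Option.isSome_iff_exists.mp ((PySem.List.index?_isSome_iff order x).mpr hx)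
    obtain ⟨iy, hiy⟩ := Option.isSome_iff_exists.mp ((PySem.List.index?_isSome_iff order y).mpr hy)
    refine ⟨x, y, ix, iy, hix, hiy, ?_, hxy⟩
    rw [hix, hiy] at hgt
    simpa using Nat.lt_of_not_le (by simpa using hgt)
  · rw [Bool.not_true]
    obtain ⟨x, y, ix, iy, hix, hiy, hlt, hmem⟩ := (bad_iff order rules).mp h
    rw [Bool.eq_false_iff]
    intro hv
    have := (valid_iff order rules).mp hv x y hmem
      ((PySem.List.index?_isSome_iff order x).mp (hix ▸ rfl))
      ((PySem.List.index?_isSome_iff order y).mp (hiy ▸ rfl))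
    rw [hix, hiy] at this
    simp at this
    omega

-- ===== VERDICT (by name: the statement is the Claim_ definition above) =====
theorem count_valid_updates_spec : Claim_equal_count_valid_updates := by
  intro rules updates _
  unfold Spec_count_valid_updates count_valid_updates count_valid_updates_alt
  congr 1
  funext acc update
  rw [valid_eq_not_bad update rules]
  dsimp only
  cases h : ((buildPos update).items.any (fun a => (buildPos update).items.any (fun b =>
      decide (a.2 > b.2) && (PySem.Set.ofList rules).contains (a.1, b.1)))) <;> rfl
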